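-- pv_equiv track=rewrite | github.com/Nakifaru/cs5 | hw8pr2.py | sum13
-- ===== SOURCE A (Python) =====
-- def sum13(nums):
--   total = 0
--   for i in range(len(nums)):
--     if nums[i] != 13:
--       if i == 0:
--         total += nums[i]
--       elif nums[i-1] != 13:
--         total += nums[i]
--   return total
-- ===== SOURCE B (Python) =====
-- def sum13(nums):
--     # Split the list into segments at each 13 (the 13s themselves are dropped),
--     # then sum the first segment fully and every later segment without its head
--     # (the head is the element that directly followed a 13).
--     segments = []
--     cur = []
--     for x in nums:
--         if x == 13:
--             segments.append(cur)
--             cur = []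
--         else:
--             cur.append(x)
--     segments.append(cur)
--     return sum(segments[0]) + sum(sum(seg[1:]) for seg in segments[1:])
-- ===== Notes on version B (the rewrite author's own statement) =====
-- stated objective: alternative
-- what changed: Instead of scanning by index and peeking at nums[i-1], B splits the list into segments delimited by 13s and sums the first segment fully plus each later segment minus its head element.
import Mathlib
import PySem

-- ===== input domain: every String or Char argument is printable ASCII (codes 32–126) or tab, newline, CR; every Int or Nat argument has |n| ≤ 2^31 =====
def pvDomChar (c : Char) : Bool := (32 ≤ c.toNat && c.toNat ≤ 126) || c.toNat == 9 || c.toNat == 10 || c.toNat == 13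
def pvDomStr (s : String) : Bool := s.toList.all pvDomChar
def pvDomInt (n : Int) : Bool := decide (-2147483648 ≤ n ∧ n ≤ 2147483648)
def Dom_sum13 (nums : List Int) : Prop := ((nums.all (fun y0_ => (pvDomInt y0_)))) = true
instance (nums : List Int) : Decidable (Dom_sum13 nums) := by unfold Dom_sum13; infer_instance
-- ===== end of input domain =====

-- B replaces A's index loop with its backward peek at nums[i-1] by a split-then-sum scheme:
-- the list is split into segments at each 13, the first segment is summed fully and every
-- later segment is summed without its head (objective: alternative; same cost).

-- ===== PORT A =====
def sum13 (nums : List Int) : Int :=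
  (PySem.List.pyRange 0 nums.length 1).foldl (fun total i =>
    if PySem.List.pyGetD nums i 0 ≠ 13 then
      if i = 0 then total + PySem.List.pyGetD nums i 0
      else if PySem.List.pyGetD nums (i - 1) 0 ≠ 13 then total + PySem.List.pyGetD nums i 0
      else total
    else total) 0

-- ===== PORT B =====
-- one splitting step of Source B's first loop: close the current segment at a 13, else extend it
def splitStep (st : List (List Int) × List Int) (x : Int) : List (List Int) × List Int :=
  if x = 13 then (st.1 ++ [st.2], []) else (st.1, st.2 ++ [x])

def sum13_alt (nums : List Int) : Int :=
  let st := nums.foldl splitStep ([], [])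
  let segments := st.1 ++ [st.2]
  -- segments is never empty, so headD [] is exactly Python's segments[0]
  (segments.headD []).sum + ((segments.drop 1).map (fun seg => (seg.drop 1).sum)).sum

-- ===== PRECONDITION & SPEC =====
def Spec_sum13 (nums : List Int) (out : Int) : Prop := out = sum13_alt nums
instance (nums : List Int) (out : Int) : Decidable (Spec_sum13 nums out) := by unfold Spec_sum13; infer_instance

-- ===== CLAIM (what is proved, stated in full; the proofs are below) =====
def Claim_equal_sum13 : Prop := ∀ (nums : List Int), Dom_sum13 nums → Spec_sum13 nums (sum13 nums)

-- ===== LEMMAS AND PROOFS =====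

-- value computed by Source B's second stage from a split state
def evalSplit (st : List (List Int) × List Int) : Int :=
  let segments := st.1 ++ [st.2]
  (segments.headD []).sum + ((segments.drop 1).map (fun seg => (seg.drop 1).sum)).sum

-- A on ys ++ [x]: the last iteration adds x iff x ≠ 13 and the last element of ys is not 13.
theorem sum13_append (ys : List Int) (x : Int) :
    sum13 (ys ++ [x]) =
      sum13 ys + (if x ≠ 13 ∧ ys.getLast? ≠ some 13 then x else 0) := by
  unfold sum13
  have hlen : ((ys ++ [x]).length : Int) = (ys.length : Int) + 1 := by simp
  rw [hlen, PySem.List.pyRange_one_succ_right (by positivity), List.foldl_append]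
  have hcongr :
      (PySem.List.pyRange 0 (ys.length : Int) 1).foldl
        (fun total i =>
          if PySem.List.pyGetD (ys ++ [x]) i 0 ≠ 13 then
            if i = 0 then total + PySem.List.pyGetD (ys ++ [x]) i 0
            else if PySem.List.pyGetD (ys ++ [x]) (i - 1) 0 ≠ 13 then
              total + PySem.List.pyGetD (ys ++ [x]) i 0
            else total
          else total) 0
      = (PySem.List.pyRange 0 (ys.length : Int) 1).foldl
        (fun total i =>
          if PySem.List.pyGetD ys i 0 ≠ 13 then
            if i = 0 then total + PySem.List.pyGetD ys i 0
            else if PySem.List.pyGetD ys (i - 1) 0 ≠ 13 then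
              total + PySem.List.pyGetD ys i 0
            else total
          else total) 0 := by
    apply PySem.List.foldl_congr_mem
    intro acc i hi
    rw [PySem.List.mem_pyRange_one] at hi
    have hget : PySem.List.pyGetD (ys ++ [x]) i 0 = PySem.List.pyGetD ys i 0 := by
      rw [PySem.List.pyGetD_eq_getElem _ 0 hi.1 (by simp; omega),
          PySem.List.pyGetD_eq_getElem _ 0 hi.1 (by exact_mod_cast hi.2),
          List.getElem_append_left]
    by_cases h0 : i = 0
    · subst h0; simp [hget]
    · have hget1 : PySem.List.pyGetD (ys ++ [x]) (i - 1) 0 = PySem.List.pyGetD ys (i - 1) 0 := by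
        rw [PySem.List.pyGetD_eq_getElem _ 0 (by omega) (by simp; omega),
            PySem.List.pyGetD_eq_getElem _ 0 (by omega) (by omega),
            List.getElem_append_left]
      simp [hget, hget1, h0]
  rw [hcongr]
  have hx : PySem.List.pyGetD (ys ++ [x]) ((ys.length : Int)) 0 = x := by
    rw [PySem.List.pyGetD_eq_getElem _ 0 (by positivity) (by simp)]
    simp
  rcases List.eq_nil_or_concat' ys with rfl | ⟨zs, z, rfl⟩
  · simp
  · have hlast : PySem.List.pyGetD ((zs ++ [z]) ++ [x]) (((zs ++ [z]).length : Int) - 1) 0 = z := by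
      have hidx : ((zs ++ [z]).length : Int) - 1 = (zs.length : Int) := by simp
      rw [hidx, PySem.List.pyGetD_eq_getElem _ 0 (by positivity) (by simp)]
      simp
    have h0 : ((zs ++ [z]).length : Int) ≠ 0 := by simp; omega
    simp only [List.foldl_cons, List.foldl_nil]
    rw [hx, hlast]
    simp only [List.getLast?_concat]
    by_cases hx13 : x = 13 <;> by_cases hz13 : z = 13 <;>
      simp [hx13, hz13]; omega

-- invariant of Source B's splitting loop: the split state evaluates to A's running total, and
-- "a segment was just closed onto a fresh empty one" records exactly "last element was 13"
theorem split_invariant (nums : List Int) :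
    evalSplit (nums.foldl splitStep ([], [])) = sum13 nums ∧
      (((nums.foldl splitStep ([], [])).1 ≠ [] ∧ (nums.foldl splitStep ([], [])).2 = []) ↔
        nums.getLast? = some 13) := by
  induction nums using List.reverseRecOn with
  | nil => refine ⟨by decide, by simp⟩
  | append_singleton ys x ih =>
    obtain ⟨ihv, ihl⟩ := ih
    rw [List.foldl_append, List.foldl_cons, List.foldl_nil, sum13_append, ← ihv]
    generalize hst : ys.foldl splitStep ([], []) = st at ihv ihl ⊢
    obtain ⟨segs, cur⟩ := st
    rw [List.getLast?_concat]
    by_cases hx13 : x = 13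
    · subst hx13
      constructor
      · simp only [splitStep]
        rcases segs with _ | ⟨s, ss⟩ <;> simp [evalSplit]
      · simp [splitStep]
    · constructor
      · simp only [splitStep, if_neg hx13]
        rcases segs with _ | ⟨s, ss⟩
        · have : ¬ (ys.getLast? = some 13) := by
            rw [← ihl]; simp
          simp [evalSplit, hx13, this]
        · rcases cur with _ | ⟨c0, ct⟩
          · have : ys.getLast? = some 13 := by rw [← ihl]; simp
            simp [evalSplit, this]
          · have : ¬ (ys.getLast? = some 13) := by
              rw [← ihl]; simp
            simp [evalSplit, hx13, this]
            ring
      · simp [splitStep, hx13]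

-- ===== VERDICT (by name: the statement is the Claim_ definition above) =====
theorem sum13_spec : Claim_equal_sum13 := by
  intro nums _
  unfold Spec_sum13 sum13_alt
  have h := (split_invariant nums).1
  simpa [evalSplit] using h.symm
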